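-- pv_equiv track=rewrite | github.com/wilmurillo-ai/Design-Assistant | .skills/openclaw-skills/skills/echodjx/docs-pdf/scripts/list_fonts.py | _compact_pages
-- ===== SOURCE A (Python) =====
-- def _compact_pages(pages: list[int]) -> str:
--     """Compact page list: [1,2,3,5,7,8,9] → '1-3, 5, 7-9'."""
--     if not pages:
--         return ""
--     if len(pages) <= 3:
--         return ", ".join(str(p) for p in pages)
--
--     ranges = []
--     start = pages[0]
--     end = pages[0]
--     for p in pages[1:]:
--         if p == end + 1:
--             end = p
--         else:
--             ranges.append(f"{start}-{end}" if start != end else str(start))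
--             start = end = p
--     ranges.append(f"{start}-{end}" if start != end else str(start))
--     return ", ".join(ranges)
-- ===== SOURCE B (Python) =====
-- def _compact_pages(pages: list[int]) -> str:
--     """Compact page list: [1,2,3,5,7,8,9] → '1-3, 5, 7-9'."""
--     if not pages:
--         return ""
--     if len(pages) <= 3:
--         return ", ".join(str(p) for p in pages)
--
--     # Right fold: walk the list backwards, merging each page into the run
--     # pairs built so far (runs[-1] is the earliest run collected).
--     runs = []
--     for p in reversed(pages):
--         if runs and runs[-1][0] == p + 1:
--             runs[-1] = (p, runs[-1][1])
--         else:
--             runs.append((p, p))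
--     return ", ".join(str(a) if a == b else f"{a}-{b}" for a, b in reversed(runs))
-- ===== Notes on version B (the rewrite author's own statement) =====
-- stated objective: alternative
-- what changed: Replaces A's forward single pass with scalar start/end state appending formatted strings by a backward right fold that builds the output back-to-front: iterating reversed(pages), each page is merged into the front (start, end) run pair of a runs list, which is then formatted and joined in a separate pass.
import Mathlib
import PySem

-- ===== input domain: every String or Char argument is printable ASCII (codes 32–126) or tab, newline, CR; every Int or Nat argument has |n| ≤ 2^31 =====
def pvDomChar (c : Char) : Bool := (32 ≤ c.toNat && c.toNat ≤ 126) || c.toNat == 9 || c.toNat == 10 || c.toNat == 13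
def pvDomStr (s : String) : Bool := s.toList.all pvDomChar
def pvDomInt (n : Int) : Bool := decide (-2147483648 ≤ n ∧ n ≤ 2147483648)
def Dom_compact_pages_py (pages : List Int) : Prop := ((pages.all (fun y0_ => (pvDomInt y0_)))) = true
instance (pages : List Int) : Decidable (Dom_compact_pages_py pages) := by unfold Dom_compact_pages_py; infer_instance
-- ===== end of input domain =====

-- B replaces A's forward start/end accumulator with a backward right fold that merges each
-- page into a list of (start, end) run pairs; return values are proved identical on all inputs.

-- ===== PORT A =====
-- f"{start}-{end}" if start != end else str(start)
def pvFmtA (s e : Int) : String :=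
  if s ≠ e then PySem.Int.toStr s ++ "-" ++ PySem.Int.toStr e else PySem.Int.toStr s

-- the 'for p in pages[1:]' loop over state (ranges, start, end), plus the trailing append
def pvALoop : List Int → List String → Int → Int → List String
  | [], ranges, start, e => ranges ++ [pvFmtA start e]
  | p :: rest, ranges, start, e =>
      if p = e + 1 then pvALoop rest ranges start p
      else pvALoop rest (ranges ++ [pvFmtA start e]) p p

def compact_pages_py (pages : List Int) : String :=
  match pages with
  | [] => ""
  | p0 :: rest =>
      if pages.length ≤ 3 then PySem.Str.join ", " (pages.map PySem.Int.toStr)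
      else PySem.Str.join ", " (pvALoop rest [] p0 p0)

-- ===== PORT B =====
-- str(a) if a == b else f"{a}-{b}"
def pvFmtB (a b : Int) : String :=
  if a = b then PySem.Int.toStr a else PySem.Int.toStr a ++ "-" ++ PySem.Int.toStr b

-- one iteration of B's backward loop: merge page p into the run pairs built so far.
-- Python's runs[-1] (the most recently touched, earliest run) is the HEAD of this Lean
-- list, so Python's final reversed(runs) is this list in order.
def pvMerge1 (p : Int) (runs : List (Int × Int)) : List (Int × Int) :=
  match runs with
  | [] => [(p, p)]
  | (s, e) :: tail => if s = p + 1 then (p, e) :: tail else (p, p) :: (s, e) :: tail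

def compact_pages_py_alt (pages : List Int) : String :=
  match pages with
  | [] => ""
  | _ :: _ =>
      if pages.length ≤ 3 then PySem.Str.join ", " (pages.map PySem.Int.toStr)
      else
        -- 'for p in reversed(pages): …merge…'
        let runs := pages.reverse.foldl (fun r p => pvMerge1 p r) []
        PySem.Str.join ", " (runs.map (fun q => pvFmtB q.1 q.2))

-- ===== PRECONDITION & SPEC =====
def Spec_compact_pages_py (pages : List Int) (out : String) : Prop := out = compact_pages_py_alt pages
instance (pages : List Int) (out : String) : Decidable (Spec_compact_pages_py pages out) := by unfold Spec_compact_pages_py; infer_instance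

-- ===== CLAIM =====
def Claim_equal_compact_pages_py : Prop := ∀ (pages : List Int), Dom_compact_pages_py pages → Spec_compact_pages_py pages (compact_pages_py pages)

-- ===== LEMMAS AND PROOFS =====

-- mathematical description of A's loop: run pairs from seed (s, e) over the rest of the list
def pvCollect : Int → Int → List Int → List (Int × Int)
  | s, e, [] => [(s, e)]
  | s, e, p :: rest => if p = e + 1 then pvCollect s p rest else (s, e) :: pvCollect p p rest

-- merging a seed run (s, e) into already-built runs (pvMerge1 p = pvMerge p p)
def pvMerge (s e : Int) : List (Int × Int) → List (Int × Int)
  | [] => [(s, e)]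
  | (s', e') :: tail => if s' = e + 1 then (s, e') :: tail else (s, e) :: (s', e') :: tail

theorem pvFmt_eq (s e : Int) : pvFmtA s e = pvFmtB s e := by
  unfold pvFmtA pvFmtB
  by_cases h : s = e <;> simp [h]

theorem pvALoop_eq (xs : List Int) : ∀ (ranges : List String) (s e : Int),
    pvALoop xs ranges s e = ranges ++ (pvCollect s e xs).map (fun q => pvFmtA q.1 q.2) := by
  induction xs with
  | nil => intro ranges s e; simp [pvALoop, pvCollect]
  | cons p rest ih =>
      intro ranges s e
      by_cases h : p = e + 1
      · simp [pvALoop, pvCollect, h, ih]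
      · simp [pvALoop, pvCollect, h, ih]

theorem pvMerge1_eq_pvMerge (p : Int) (runs : List (Int × Int)) :
    pvMerge1 p runs = pvMerge p p runs := by
  cases runs with
  | nil => rfl
  | cons q t => cases q; rfl

-- the key algebraic step: folding the seed run into already-merged runs
theorem pvMerge_step (s e p : Int) (F : List (Int × Int)) :
    (if p = e + 1 then pvMerge s p F else (s, e) :: pvMerge p p F) =
      pvMerge s e (pvMerge p p F) := by
  cases F with
  | nil => by_cases h : p = e + 1 <;> simp [pvMerge, h]
  | cons q t =>
      obtain ⟨s', e'⟩ := q
      simp only [pvMerge]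
      split_ifs <;> simp_all

theorem pvCollect_eq_foldr (xs : List Int) : ∀ (s e : Int),
    pvCollect s e xs = pvMerge s e (xs.foldr pvMerge1 []) := by
  induction xs with
  | nil => intro s e; rfl
  | cons p rest ih =>
      intro s e
      have : pvCollect s e (p :: rest) =
          if p = e + 1 then pvMerge s p (rest.foldr pvMerge1 [])
          else (s, e) :: pvMerge p p (rest.foldr pvMerge1 []) := by
        by_cases h : p = e + 1 <;> simp [pvCollect, h, ih]
      rw [this, pvMerge_step]
      simp [List.foldr, pvMerge1_eq_pvMerge]

-- ===== VERDICT =====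
theorem compact_pages_py_spec : Claim_equal_compact_pages_py := by
  intro pages _
  unfold Spec_compact_pages_py
  cases pages with
  | nil => rfl
  | cons p0 rest =>
      simp only [compact_pages_py, compact_pages_py_alt]
      by_cases hlen : (p0 :: rest).length ≤ 3
      · rw [if_pos hlen, if_pos hlen]
      · rw [if_neg hlen, if_neg hlen]
        rw [pvALoop_eq]
        simp only [List.nil_append, List.foldl_reverse]
        have hfun : (fun (p : Int) (r : List (Int × Int)) => pvMerge1 p r) = pvMerge1 := rfl
        rw [hfun]
        have hruns : (p0 :: rest).foldr pvMerge1 [] = pvCollect p0 p0 rest := by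
          simp only [List.foldr]
          rw [pvMerge1_eq_pvMerge, ← pvCollect_eq_foldr]
        rw [hruns]
        congr 1
        apply List.map_congr_left
        intro q _
        exact pvFmt_eq q.1 q.2
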